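-- pv_equiv track=rewrite | github.com/qrybik-dot/ai-health-stealth-bot | color_engine.py | _hue_family
-- ===== SOURCE A (Python) =====
-- from typing import Any, Dict, List, Tuple
--
-- def _hue_family(h: int) -> Tuple[str, str]:
--     families = [
--         (15, ("красно", "красный")),
--         (45, ("оранжево", "оранжевый")),
--         (70, ("жёлто", "жёлтый")),
--         (150, ("зелёно", "зелёный")),
--         (200, ("бирюзово", "бирюзовый")),
--         (250, ("сине", "синий")),
--         (290, ("фиолетово", "фиолетовый")),
--         (340, ("пурпурно", "пурпурный")),
--         (361, ("красно", "красный")),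
--     ]
--     for border, pair in families:
--         if h < border:
--             return pair
--     return "нейтрально", "нейтральный"
-- ===== SOURCE B (Python) =====
-- import bisect
-- from typing import Tuple
--
-- _BORDERS = [15, 45, 70, 150, 200, 250, 290, 340, 361]
-- _PAIRS = [
--     ("красно", "красный"),
--     ("оранжево", "оранжевый"),
--     ("жёлто", "жёлтый"),
--     ("зелёно", "зелёный"),
--     ("бирюзово", "бирюзовый"),
--     ("сине", "синий"),
--     ("фиолетово", "фиолетовый"),
--     ("пурпурно", "пурпурный"),
--     ("красно", "красный"),
--     ("нейтрально", "нейтральный"),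
-- ]
--
-- def _hue_family(h: int) -> Tuple[str, str]:
--     return _PAIRS[bisect.bisect_right(_BORDERS, h)]
-- ===== Notes on version B (the rewrite author's own statement) =====
-- stated objective: idiomatic
-- what changed: Replaces the sequential scan over (border, pair) tuples with bisect.bisect_right on a parallel borders list and a direct index into a pairs table (neutral pair as the last entry).
import Mathlib
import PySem

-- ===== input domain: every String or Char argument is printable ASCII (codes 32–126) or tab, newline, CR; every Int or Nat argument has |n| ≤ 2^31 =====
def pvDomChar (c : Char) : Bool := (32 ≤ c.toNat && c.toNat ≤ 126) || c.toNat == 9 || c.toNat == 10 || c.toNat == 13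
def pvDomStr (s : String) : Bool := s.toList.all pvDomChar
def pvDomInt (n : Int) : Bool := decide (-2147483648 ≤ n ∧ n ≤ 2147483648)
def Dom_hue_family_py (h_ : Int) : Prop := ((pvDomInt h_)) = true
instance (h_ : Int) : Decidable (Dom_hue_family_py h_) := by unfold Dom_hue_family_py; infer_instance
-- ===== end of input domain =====

-- B replaces A's sequential border scan by bisect_right binary search into parallel
-- borders/pairs tables with a direct index lookup (idiomatic; same result).

-- ===== PORT A =====
-- the for-loop with early return over the literal (border, pair) list
def pvScanA (h : Int) : List (Int × (String × String)) → String × String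
  | [] => ("нейтрально", "нейтральный")
  | (border, pair) :: rest => if h < border then pair else pvScanA h rest

def hue_family_py (h_ : Int) : String × String :=
  pvScanA h_
    [ (15, ("красно", "красный")),
      (45, ("оранжево", "оранжевый")),
      (70, ("жёлто", "жёлтый")),
      (150, ("зелёно", "зелёный")),
      (200, ("бирюзово", "бирюзовый")),
      (250, ("сине", "синий")),
      (290, ("фиолетово", "фиолетовый")),
      (340, ("пурпурно", "пурпурный")),
      (361, ("красно", "красный")) ]

-- ===== PORT B =====
-- bisect.bisect_right(a, x) with lo = 0, hi = len(a): binary search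
def pvBisectRight (a : List Int) (x : Int) (lo hi : Nat) : Nat :=
  if hlt : lo < hi then
    let mid := (lo + hi) / 2
    if x < a.getD mid 0 then pvBisectRight a x lo mid
    else pvBisectRight a x (mid + 1) hi
  else lo
termination_by hi - lo
decreasing_by all_goals omega

def pvBorders : List Int := [15, 45, 70, 150, 200, 250, 290, 340, 361]

def pvPairs : List (String × String) :=
  [ ("красно", "красный"),
    ("оранжево", "оранжевый"),
    ("жёлто", "жёлтый"),
    ("зелёно", "зелёный"),
    ("бирюзово", "бирюзовый"),
    ("сине", "синий"),
    ("фиолетово", "фиолетовый"),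
    ("пурпурно", "пурпурный"),
    ("красно", "красный"),
    ("нейтрально", "нейтральный") ]

def hue_family_py_alt (h_ : Int) : String × String :=
  pvPairs.getD (pvBisectRight pvBorders h_ 0 pvBorders.length) ("", "")

-- ===== PRECONDITION & SPEC =====
def Spec_hue_family_py (h_ : Int) (out : String × String) : Prop := out = hue_family_py_alt h_
instance (h_ : Int) (out : String × String) : Decidable (Spec_hue_family_py h_ out) := by unfold Spec_hue_family_py; infer_instance

-- ===== CLAIM (what is proved, stated in full; the proofs are below) =====
def Claim_equal_hue_family_py : Prop := ∀ (h_ : Int), Dom_hue_family_py h_ → Spec_hue_family_py h_ (hue_family_py h_)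

-- ===== LEMMAS AND PROOFS =====

-- ===== VERDICT (by name: the statement is the Claim_ definition above) =====
theorem hue_family_py_spec : Claim_equal_hue_family_py := by
  intro h _
  unfold Spec_hue_family_py hue_family_py hue_family_py_alt
  simp only [pvScanA, pvBorders, pvPairs, List.length]
  rw [pvBisectRight]; simp only [List.getD]
  norm_num
  split_ifs <;> simp_all [pvBisectRight, List.getD] <;> split_ifs <;> (try simp_all) <;> omega
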